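-- pv_equiv track=rewrite | github.com/harshmalviya7/LeetCode_Coding_Questions | String/numberOfDifferentIntegersInAString.py | numDifferentIntegers
-- ===== SOURCE A (Python) =====
-- def numDifferentIntegers(word: str) -> int:
--     i = 0
--     c = 0
--     s = set()
--     while (i < len(word)):
--         if word[i].isdigit():
--
--             a = ""
--             while (i < len(word) and word[i].isdigit()):
--                 a += word[i]
--                 i += 1
--             s.add(int(a))
--         i += 1
--     return len(s)
-- ===== SOURCE B (Python) =====
-- def numDifferentIntegers(word: str) -> int:
--     tokens = ''.join(c if c.isdigit() else ' ' for c in word).split()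
--     return len({int(t) for t in tokens})
-- ===== Notes on version B (the rewrite author's own statement) =====
-- stated objective: idiomatic
-- what changed: Replaces the manual index-driven nested while-loop scan with a declarative pipeline: blank out non-digit characters, split on whitespace to get the maximal digit runs, and take the size of the set of their int values.
import Mathlib
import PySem

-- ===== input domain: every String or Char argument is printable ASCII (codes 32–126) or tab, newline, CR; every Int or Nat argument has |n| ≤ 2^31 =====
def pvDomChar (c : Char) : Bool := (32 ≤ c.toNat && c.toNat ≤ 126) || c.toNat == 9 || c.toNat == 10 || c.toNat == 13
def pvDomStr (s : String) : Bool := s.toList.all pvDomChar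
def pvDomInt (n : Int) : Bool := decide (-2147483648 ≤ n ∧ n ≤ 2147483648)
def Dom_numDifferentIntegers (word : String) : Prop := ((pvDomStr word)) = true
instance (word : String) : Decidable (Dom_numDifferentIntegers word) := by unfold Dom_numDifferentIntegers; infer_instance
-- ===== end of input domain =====

-- B replaces A's index-driven nested while-loop scan with a declarative pipeline (blank out
-- non-digits, split on whitespace, dedup the int values); same behaviour, same O(n) cost.

-- int(a) for a maximal digit run a (always a nonempty digit string, so parsing succeeds)
def runVal (cs : List Char) : Int := (PySem.Int.ofChars? cs).getD 0

-- ===== PORT A =====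
-- A's outer while: scan char by char; on a digit, the inner while collects the maximal
-- digit run, i ends past the run, and the trailing 'i += 1' skips one extra character.
def goA : List Char → PySem.Set Int → PySem.Set Int
  | [], s => s
  | c :: rest, s =>
    if PySem.Chars.isdigit c then
      goA ((List.dropWhile PySem.Chars.isdigit (c :: rest)).drop 1)
        (PySem.Set.add s (runVal (List.takeWhile PySem.Chars.isdigit (c :: rest))))
    else goA rest s
  termination_by l _ => l.length
  decreasing_by
  · -- the head is a digit, so dropWhile consumes at least it
    have h3 : (List.dropWhile PySem.Chars.isdigit (c :: rest)).length ≤ rest.length := by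
      simp only [List.dropWhile_cons, *, if_true]
      exact List.length_dropWhile_le _ _
    have h2 : ((List.dropWhile PySem.Chars.isdigit (c :: rest)).drop 1).length
        ≤ (List.dropWhile PySem.Chars.isdigit (c :: rest)).length := by
      simp only [List.length_drop]; omega
    simp only [List.length_cons]; omega
  · simp

def numDifferentIntegers (word : String) : Int :=
  (goA word.toList PySem.Set.empty).length

-- ===== PORT B =====
def padChar (c : Char) : Char := if PySem.Chars.isdigit c then c else ' '

def numDifferentIntegers_alt (word : String) : Int :=
  let tokens := PySem.Chars.split₀ (word.toList.map padChar)
  (PySem.Set.ofList (tokens.map runVal)).length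

-- ===== PRECONDITION & SPEC =====
def Spec_numDifferentIntegers (word : String) (out : Int) : Prop := out = numDifferentIntegers_alt word
instance (word : String) (out : Int) : Decidable (Spec_numDifferentIntegers word out) := by unfold Spec_numDifferentIntegers; infer_instance

-- ===== CLAIM (what is proved, stated in full; the proofs are below) =====
def Claim_equal_numDifferentIntegers : Prop := ∀ (word : String), Dom_numDifferentIntegers word → Spec_numDifferentIntegers word (numDifferentIntegers word)

-- ===== LEMMAS AND PROOFS =====

-- the list of maximal digit runs of a character list, in order
def runs : List Char → List (List Char)
  | [] => []
  | c :: rest =>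
    if PySem.Chars.isdigit c then
      List.takeWhile PySem.Chars.isdigit (c :: rest) :: runs (List.dropWhile PySem.Chars.isdigit rest)
    else runs rest
  termination_by l => l.length
  decreasing_by
  · simp only [List.length_cons]
    have := List.length_dropWhile_le (p := PySem.Chars.isdigit) (l := rest)
    omega
  · simp

theorem isspace_of_isdigit (c : Char) (h : PySem.Chars.isdigit c = true) :
    PySem.Chars.isspace c = false := by
  simp only [PySem.Chars.isdigit, Bool.and_eq_true, decide_eq_true_eq] at h
  have h1 : 48 ≤ c.toNat := h.1
  have h2 : c.toNat ≤ 57 := h.2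
  simp [PySem.Chars.isspace]
  omega

theorem runs_nil : runs [] = [] := by rw [runs.eq_def]

theorem runs_cons_digit (c : Char) (rest : List Char) (h : PySem.Chars.isdigit c = true) :
    runs (c :: rest) = List.takeWhile PySem.Chars.isdigit (c :: rest)
      :: runs (List.dropWhile PySem.Chars.isdigit rest) := by
  rw [runs.eq_def]; simp [h]

theorem runs_cons_not_digit (c : Char) (rest : List Char)
    (h : PySem.Chars.isdigit c = false) : runs (c :: rest) = runs rest := by
  rw [runs.eq_def]; simp [h]

-- A's loop computes the fold of Set.add ∘ runVal over the maximal digit runs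
theorem goA_eq_foldl : ∀ (n : Nat) (l : List Char), l.length ≤ n → ∀ (s : PySem.Set Int),
    goA l s = (runs l).foldl (fun acc r => PySem.Set.add acc (runVal r)) s := by
  intro n
  induction n with
  | zero =>
    intro l hl s
    have : l = [] := List.eq_nil_of_length_eq_zero (Nat.le_zero.mp hl)
    subst this; rw [goA, runs_nil]; rfl
  | succ n ih =>
    intro l hl s
    match l with
    | [] => rw [goA, runs_nil]; rfl
    | c :: rest =>
      by_cases hc : PySem.Chars.isdigit c = true
      · rw [goA, runs_cons_digit c rest hc]
        simp only [hc, if_true]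
        have hdw : List.dropWhile PySem.Chars.isdigit (c :: rest)
            = List.dropWhile PySem.Chars.isdigit rest := by
          simp [hc]
        rw [hdw]
        have hlen : (List.dropWhile PySem.Chars.isdigit rest).length ≤ rest.length :=
          List.length_dropWhile_le _ _
        have hlen' : rest.length ≤ n := by
          simp only [List.length_cons] at hl; omega
        -- the head of dropWhile (if any) is not a digit, so dropping it keeps the runs
        have hruns : runs ((List.dropWhile PySem.Chars.isdigit rest).drop 1)
            = runs (List.dropWhile PySem.Chars.isdigit rest) := by
          cases hdd : List.dropWhile PySem.Chars.isdigit rest with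
          | nil => simp
          | cons d t =>
            have hd : PySem.Chars.isdigit d = false := by
              have := List.head?_dropWhile_not (p := PySem.Chars.isdigit) (l := rest)
              rw [hdd] at this
              simpa using this
            simp [runs_cons_not_digit d t hd]
        rw [ih _ (by simp only [List.length_drop]; omega) _, hruns]
        simp [List.foldl_cons]
      · simp only [Bool.not_eq_true] at hc
        rw [goA, runs_cons_not_digit c rest hc]
        simp only [hc, Bool.false_eq_true, if_false]
        exact ih rest (by simp only [List.length_cons] at hl; omega) s

-- split₀ of the blanked-out list yields exactly the maximal digit runs; proved through
-- the accumulator invariant of split₀.go (mutual statement for empty / in-run buffer)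
theorem go_pad_spec : ∀ (l : List Char),
    (∀ acc : List (List Char),
      PySem.Chars.split₀.go (l.map padChar) [] acc = acc.reverse ++ runs l) ∧
    (∀ (cur : List Char) (acc : List (List Char)), cur ≠ [] →
      PySem.Chars.split₀.go (l.map padChar) cur acc
        = acc.reverse ++ (cur.reverse ++ List.takeWhile PySem.Chars.isdigit l)
            :: runs (List.dropWhile PySem.Chars.isdigit l)) := by
  intro l
  induction l with
  | nil =>
    constructor
    · intro acc; rw [runs_nil]; simp [PySem.Chars.split₀.go]
    · intro cur acc hcur
      simp only [List.dropWhile_nil, List.takeWhile_nil, runs_nil]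
      simp [PySem.Chars.split₀.go, List.isEmpty_iff, hcur]
  | cons c rest ih =>
    constructor
    · intro acc
      by_cases hc : PySem.Chars.isdigit c = true
      · have hpad : padChar c = c := by simp [padChar, hc]
        have hsp := isspace_of_isdigit c hc
        rw [runs_cons_digit c rest hc]
        simp only [List.map_cons, hpad]
        rw [PySem.Chars.split₀.go]
        simp only [hsp, Bool.false_eq_true, if_false]
        rw [ih.2 [c] acc (by simp)]
        simp [hc]
      · simp only [Bool.not_eq_true] at hc
        have hpad : padChar c = ' ' := by simp [padChar, hc]
        have hsp : PySem.Chars.isspace ' ' = true := by decide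
        rw [runs_cons_not_digit c rest hc]
        simp only [List.map_cons, hpad]
        rw [PySem.Chars.split₀.go]
        simp only [hsp, if_true, List.isEmpty_nil, if_true]
        exact ih.1 acc
    · intro cur acc hcur
      by_cases hc : PySem.Chars.isdigit c = true
      · have hpad : padChar c = c := by simp [padChar, hc]
        have hsp := isspace_of_isdigit c hc
        simp only [List.map_cons, hpad]
        rw [PySem.Chars.split₀.go]
        simp only [hsp, Bool.false_eq_true, if_false]
        rw [ih.2 (c :: cur) acc (by simp)]
        simp [hc]
      · simp only [Bool.not_eq_true] at hc
        have hpad : padChar c = ' ' := by simp [padChar, hc]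
        have hsp : PySem.Chars.isspace ' ' = true := by decide
        simp only [List.map_cons, hpad]
        rw [PySem.Chars.split₀.go]
        simp only [hsp, if_true, List.isEmpty_iff, hcur, if_false]
        rw [ih.1 (cur.reverse :: acc)]
        simp [hc, runs_cons_not_digit c rest hc]

theorem split₀_pad_eq_runs (l : List Char) :
    PySem.Chars.split₀ (l.map padChar) = runs l := by
  have := (go_pad_spec l).1 []
  simpa [PySem.Chars.split₀] using this

-- ===== VERDICT (by name: the statement is the Claim_ definition above) =====
theorem numDifferentIntegers_spec : Claim_equal_numDifferentIntegers := by
  intro word _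
  unfold Spec_numDifferentIntegers numDifferentIntegers numDifferentIntegers_alt
  rw [split₀_pad_eq_runs]
  rw [goA_eq_foldl word.toList.length word.toList (le_refl _) PySem.Set.empty]
  congr 1
  rw [PySem.Set.ofList_eq_foldl, List.foldl_map]
  rfl
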